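-- pv_equiv track=rewrite | github.com/Mercy2Green/m2g_concept_graph | conceptgraph/cg_process/cg_edge_finetune.py | find_union_of_viewpoints
-- ===== SOURCE A (Python) =====
-- def find_union_of_viewpoints(viewpoints_a, paths):
--     union_result = set()
--     intersections = []
--     for path in paths:
--         intersection = find_subsequences(viewpoints_a, path)
--         if list(intersection) != []:
--             intersections.append(intersection)
--     # # get the union of all intersections
--     for intersection in intersections:
--         union_result.update(intersection)
--     return union_result
--
-- def find_subsequences(lst, target_lst):
--     # lst is the list to search in the target_lst.
--     sublists = get_all_sublists(lst)
--     subsequences = set()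
--
--     for subl in sublists:
--         length = len(subl)
--         for i in range(len(target_lst)-length+1):
--             sub_target_lst = tuple(target_lst[i:i+length])
--             if sub_target_lst == tuple(subl):
--                 subsequences.add(sub_target_lst)
--     return subsequences
--
-- def get_all_sublists(lst):
--     sublists = []
--     for i in range(len(lst)):
--         for j in range(i+1, len(lst)+1):
--             sublists.append(lst[i:j])
--     return sublists
-- ===== SOURCE B (Python) =====
-- def find_union_of_viewpoints(viewpoints_a, paths):
--     n = len(viewpoints_a)
--     result = set()
--     for path in paths:
--         m = len(path)
--         # index every window of path (length 1..n) once, then look sublists up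
--         subs = set()
--         for p in range(m):
--             for q in range(p + 1, min(p + n, m) + 1):
--                 subs.add(tuple(path[p:q]))
--         for i in range(n):
--             for j in range(i + 1, n + 1):
--                 t = tuple(viewpoints_a[i:j])
--                 if t in subs:
--                     result.add(t)
--     return result
-- ===== Notes on version B (the rewrite author's own statement) =====
-- stated objective: alternative
-- what changed: Instead of rescanning every path position for each of the O(n^2) sublists, B indexes each path's windows of length <= n in a hash set once and answers each sublist by a single set lookup.
import Mathlib
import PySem

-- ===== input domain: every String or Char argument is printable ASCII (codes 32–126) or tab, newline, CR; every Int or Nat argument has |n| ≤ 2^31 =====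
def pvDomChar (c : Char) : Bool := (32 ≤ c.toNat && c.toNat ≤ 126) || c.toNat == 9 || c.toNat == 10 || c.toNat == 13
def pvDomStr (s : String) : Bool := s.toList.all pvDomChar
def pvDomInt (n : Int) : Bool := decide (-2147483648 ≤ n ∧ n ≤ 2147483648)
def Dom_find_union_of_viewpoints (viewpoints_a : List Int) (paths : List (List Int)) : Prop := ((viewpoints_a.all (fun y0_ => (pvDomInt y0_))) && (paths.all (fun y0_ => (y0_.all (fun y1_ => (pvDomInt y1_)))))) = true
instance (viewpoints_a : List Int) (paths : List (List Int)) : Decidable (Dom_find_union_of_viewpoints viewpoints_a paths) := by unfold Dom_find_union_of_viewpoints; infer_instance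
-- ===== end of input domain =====

-- B replaces A's per-sublist positional rescans of each path by one set of the path's
-- windows of length ≤ n, each sublist then answered by a single membership lookup
-- (objective: alternative algorithm, same measured cost).
-- Both Pythons return a set; equality below is of the PySem.Set element lists
-- (first-insertion order), which both ports maintain.

-- ===== PORT A =====
def get_all_sublists (lst : List Int) : List (List Int) :=
  (PySem.List.pyRange 0 (lst.length : Int)).foldl (fun sublists i =>
    (PySem.List.pyRange (i + 1) ((lst.length : Int) + 1)).foldl (fun sublists j =>
      sublists ++ [PySem.List.slice lst (some i) (some j)]) sublists) []

def find_subsequences (lst : List Int) (target_lst : List Int) : PySem.Set (List Int) :=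
  (get_all_sublists lst).foldl (fun subsequences subl =>
    (PySem.List.pyRange 0 ((target_lst.length : Int) - (subl.length : Int) + 1)).foldl
      (fun subsequences i =>
        let sub_target_lst := PySem.List.slice target_lst (some i) (some (i + (subl.length : Int)))
        if sub_target_lst = subl then PySem.Set.add subsequences sub_target_lst else subsequences)
      subsequences) PySem.Set.empty

def find_union_of_viewpoints (viewpoints_a : List Int) (paths : List (List Int)) : List (List Int) :=
  -- 'if list(intersection) != []' only tests emptiness, which is order-independent
  let intersections := paths.foldl (fun intersections path =>
    let intersection := find_subsequences viewpoints_a path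
    if intersection ≠ [] then intersections ++ [intersection] else intersections) []
  intersections.foldl (fun union_result intersection =>
    PySem.Set.update union_result intersection) PySem.Set.empty

-- ===== PORT B =====
def find_union_of_viewpoints_alt (viewpoints_a : List Int) (paths : List (List Int)) : List (List Int) :=
  let n : Int := viewpoints_a.length
  paths.foldl (fun result path =>
    let m : Int := path.length
    let subs := (PySem.List.pyRange 0 m).foldl (fun subs p =>
      (PySem.List.pyRange (p + 1) (min (p + n) m + 1)).foldl (fun subs q =>
        PySem.Set.add subs (PySem.List.slice path (some p) (some q))) subs) PySem.Set.empty
    (PySem.List.pyRange 0 n).foldl (fun result i =>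
      (PySem.List.pyRange (i + 1) (n + 1)).foldl (fun result j =>
        let t := PySem.List.slice viewpoints_a (some i) (some j)
        if subs.contains t then PySem.Set.add result t else result) result) result) PySem.Set.empty

-- ===== PRECONDITION & SPEC =====
def Spec_find_union_of_viewpoints (viewpoints_a : List Int) (paths : List (List Int)) (out : List (List Int)) : Prop := out = find_union_of_viewpoints_alt viewpoints_a paths
instance (viewpoints_a : List Int) (paths : List (List Int)) (out : List (List Int)) : Decidable (Spec_find_union_of_viewpoints viewpoints_a paths out) := by unfold Spec_find_union_of_viewpoints; infer_instance

-- ===== CLAIM (what is proved, stated in full; the proofs are below) =====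
def Claim_equal_find_union_of_viewpoints : Prop := ∀ (viewpoints_a : List Int) (paths : List (List Int)), Dom_find_union_of_viewpoints viewpoints_a paths → Spec_find_union_of_viewpoints viewpoints_a paths (find_union_of_viewpoints viewpoints_a paths)

-- ===== LEMMAS AND PROOFS =====

-- the sublists of lst in A's (i, j) enumeration order
def sublistsOf (lst : List Int) : List (List Int) :=
  (PySem.List.pyRange 0 (lst.length : Int)).flatMap (fun i =>
    (PySem.List.pyRange (i + 1) ((lst.length : Int) + 1)).map (fun j =>
      PySem.List.slice lst (some i) (some j)))

-- conditionally add x to the set (the common per-sublist step both sides reduce to)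
def condAdd (p : List Int → Bool) (s : PySem.Set (List Int)) (x : List Int) : PySem.Set (List Int) :=
  if p x then s.add x else s

-- A's inner condition: some window of target equals subl (positional scan)
def occA (target subl : List Int) : Bool :=
  (PySem.List.pyRange 0 ((target.length : Int) - (subl.length : Int) + 1)).any
    (fun i => PySem.List.slice target (some i) (some (i + (subl.length : Int))) == subl)

-- B's window set for one path
def subsSet (n : Int) (path : List Int) : PySem.Set (List Int) :=
  (PySem.List.pyRange 0 (path.length : Int)).foldl (fun subs p =>
    (PySem.List.pyRange (p + 1) (min (p + n) (path.length : Int) + 1)).foldl (fun subs q =>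
      PySem.Set.add subs (PySem.List.slice path (some p) (some q))) subs) PySem.Set.empty

lemma slice_toNat {α : Type} (xs : List α) {p q : Int} (hp : 0 ≤ p) (hq : 0 ≤ q) :
    PySem.List.slice xs (some p) (some q) = (xs.drop p.toNat).take (q.toNat - p.toNat) := by
  lift p to ℕ using hp
  lift q to ℕ using hq
  simpa using PySem.List.slice_natCast xs p q

lemma length_slice_int {α : Type} (xs : List α) {p q : Int} (hp : 0 ≤ p) (hpq : p ≤ q)
    (hq : q ≤ (xs.length : Int)) :
    ((PySem.List.slice xs (some p) (some q)).length : Int) = q - p := by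
  rw [slice_toNat xs hp (le_trans hp hpq)]
  simp only [List.length_take, List.length_drop]
  omega

lemma sublistsOf_eq (lst : List Int) : get_all_sublists lst = sublistsOf lst := by
  unfold get_all_sublists sublistsOf
  refine Eq.trans (PySem.List.foldl_congr_mem _ _
    (fun sublists i => sublists ++ (PySem.List.pyRange (i + 1) ((lst.length : Int) + 1)).map
      (fun j => PySem.List.slice lst (some i) (some j))) _
    (fun acc i _ => PySem.List.foldl_append_singleton_eq_map _ _ acc)) ?_
  rw [PySem.List.foldl_append_eq_flatMap]
  simp

lemma mem_sublistsOf_shape {lst x : List Int} (hx : x ∈ sublistsOf lst) :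
    ∃ i j : Int, 0 ≤ i ∧ i < (lst.length : Int) ∧ i + 1 ≤ j ∧ j ≤ (lst.length : Int) ∧
      x = PySem.List.slice lst (some i) (some j) := by
  unfold sublistsOf at hx
  simp only [List.mem_flatMap, List.mem_map, PySem.List.mem_pyRange_one] at hx
  obtain ⟨i, ⟨hi0, hin⟩, j, ⟨hj1, hjn⟩, rfl⟩ := hx
  exact ⟨i, j, hi0, hin, hj1, by omega, rfl⟩

lemma length_mem_sublistsOf {lst x : List Int} (hx : x ∈ sublistsOf lst) :
    1 ≤ (x.length : Int) ∧ (x.length : Int) ≤ (lst.length : Int) := by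
  obtain ⟨i, j, hi0, hin, hj1, hjn, rfl⟩ := mem_sublistsOf_shape hx
  rw [length_slice_int lst hi0 (by omega) hjn]
  omega

-- one conditional-add pass over a set-building nested fold: membership characterisation
lemma mem_foldl_foldl_add (outer : List Int) (inner : Int → List Int)
    (f : Int → Int → List Int) :
    ∀ (s : PySem.Set (List Int)) (y : List Int),
      y ∈ outer.foldl (fun s p => (inner p).foldl (fun s q => s.add (f p q)) s) s ↔
        y ∈ s ∨ ∃ p ∈ outer, ∃ q ∈ inner p, y = f p q := by
  induction outer with
  | nil => simp
  | cons p rest ih =>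
    intro s y
    rw [List.foldl_cons, ih]
    rw [PySem.Set.mem_foldl_add (inner p) (f p) s y]
    simp only [List.mem_cons]
    constructor
    · rintro ((hy | ⟨q, hq, rfl⟩) | ⟨p', hp', q, hq, rfl⟩)
      · exact .inl hy
      · exact .inr ⟨p, .inl rfl, q, hq, rfl⟩
      · exact .inr ⟨p', .inr hp', q, hq, rfl⟩
    · rintro (hy | ⟨p', (rfl | hp'), q, hq, rfl⟩)
      · exact .inl (.inl hy)
      · exact .inl (.inr ⟨q, hq, rfl⟩)
      · exact .inr ⟨p', hp', q, hq, rfl⟩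

lemma mem_subsSet_iff {n : Int} (path t : List Int) (h1 : 1 ≤ (t.length : Int))
    (h2 : (t.length : Int) ≤ n) :
    t ∈ subsSet n path ↔ occA path t = true := by
  unfold subsSet occA
  rw [mem_foldl_foldl_add]
  simp only [PySem.Set.empty, List.not_mem_nil, false_or, List.any_eq_true,
    PySem.List.mem_pyRange_one, beq_iff_eq]
  constructor
  · rintro ⟨p, ⟨hp0, hpm⟩, q, ⟨hq1, hqm⟩, rfl⟩
    have hqle : q ≤ (path.length : Int) := by omega
    have hL : ((PySem.List.slice path (some p) (some q)).length : Int) = q - p :=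
      length_slice_int path hp0 (by omega) hqle
    refine ⟨p, ⟨hp0, by rw [hL]; omega⟩, ?_⟩
    rw [hL]
    congr 2
    omega
  · rintro ⟨i, ⟨hi0, him⟩, hsl⟩
    have hqle : i + (t.length : Int) ≤ (path.length : Int) := by omega
    exact ⟨i, ⟨hi0, by omega⟩, i + (t.length : Int), ⟨by omega, by omega⟩, hsl.symm⟩

-- A's positional inner loop adds subl exactly when some position matches
lemma fold_findAdd {α β : Type} [DecidableEq β] [BEq β] [LawfulBEq β] (l : List α) (f : α → β) (t : β)
    (s : PySem.Set β) :
    l.foldl (fun s i => if f i = t then s.add (f i) else s) s =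
      if l.any (fun i => f i == t) then s.add t else s := by
  induction l generalizing s with
  | nil => simp
  | cons x rest ih =>
    rw [List.foldl_cons, ih]
    by_cases hx : f x = t
    · subst hx
      simp only [List.any_cons, beq_self_eq_true, Bool.true_or, if_true]
      split
      · exact PySem.Set.add_of_mem ((PySem.Set.mem_add s (f x) (f x)).mpr (.inr rfl))
      · rfl
    · simp [hx]

-- updating with a filtered set-build equals running the conditional adds directly
lemma update_foldl_condAdd (p : List Int → Bool) (l : List (List Int)) :
    ∀ (t s : PySem.Set (List Int)),
      PySem.Set.update s (l.foldl (condAdd p) t) = l.foldl (condAdd p) (PySem.Set.update s t) := by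
  induction l with
  | nil => intro t s; rfl
  | cons x rest ih =>
    intro t s
    rw [List.foldl_cons, ih, List.foldl_cons]
    congr 1
    unfold condAdd
    split
    · by_cases hx : x ∈ t
      · rw [PySem.Set.add_of_mem hx,
          PySem.Set.add_of_mem ((PySem.Set.mem_update s t x).mpr (.inr hx))]
      · rw [PySem.Set.add_of_not_mem hx]
        show (t ++ [x]).foldl PySem.Set.add s = _
        rw [List.foldl_append]
        rfl
    · rfl

-- A per path: find_subsequences as a single conditional-add pass over the sublists
lemma find_subsequences_eq (lst path : List Int) :
    find_subsequences lst path = (sublistsOf lst).foldl (condAdd (occA path)) PySem.Set.empty := by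
  unfold find_subsequences
  rw [sublistsOf_eq]
  refine PySem.List.foldl_congr_mem _ _ _ _ (fun s subl _ => ?_)
  show (PySem.List.pyRange 0 ((path.length : Int) - (subl.length : Int) + 1)).foldl
      (fun s i => if PySem.List.slice path (some i) (some (i + (subl.length : Int))) = subl
        then s.add (PySem.List.slice path (some i) (some (i + (subl.length : Int)))) else s) s
    = condAdd (occA path) s subl
  exact fold_findAdd (PySem.List.pyRange 0 ((path.length : Int) - (subl.length : Int) + 1))
    (fun i => PySem.List.slice path (some i) (some (i + (subl.length : Int)))) subl s

-- A's collect-nonempty-then-union equals a direct per-path union fold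
lemma collect_update (S : List Int → PySem.Set (List Int)) (paths : List (List Int)) :
    ∀ (acc : List (PySem.Set (List Int))),
      (paths.foldl (fun acc path => if S path ≠ [] then acc ++ [S path] else acc) acc).foldl
          (fun u inter => PySem.Set.update u inter) PySem.Set.empty =
        paths.foldl (fun u path => PySem.Set.update u (S path))
          (acc.foldl (fun u inter => PySem.Set.update u inter) PySem.Set.empty) := by
  induction paths with
  | nil => intro acc; rfl
  | cons path rest ih =>
    intro acc
    rw [List.foldl_cons, ih, List.foldl_cons]
    congr 1
    by_cases h : S path ≠ []
    · rw [if_pos h, List.foldl_append]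
      rfl
    · rw [if_neg h]
      simp only [ne_eq, not_not] at h
      rw [h, PySem.Set.update_nil]

theorem find_union_of_viewpoints_eq_alt (viewpoints_a : List Int) (paths : List (List Int)) :
    find_union_of_viewpoints viewpoints_a paths = find_union_of_viewpoints_alt viewpoints_a paths := by
  unfold find_union_of_viewpoints find_union_of_viewpoints_alt
  rw [collect_update (find_subsequences viewpoints_a) paths []]
  refine PySem.List.foldl_congr_mem _ _ _ _ (fun u path _ => ?_)
  -- A side: union-update with the per-path intersection set
  rw [find_subsequences_eq, update_foldl_condAdd (occA path) (sublistsOf viewpoints_a)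
    PySem.Set.empty u]
  have hu : PySem.Set.update u PySem.Set.empty = u := rfl
  rw [hu]
  -- B side: flatten the nested index loops into one pass over the sublists
  show _ = (PySem.List.pyRange 0 (viewpoints_a.length : Int)).foldl (fun result i =>
    (PySem.List.pyRange (i + 1) ((viewpoints_a.length : Int) + 1)).foldl (fun result j =>
      condAdd (fun t => (subsSet (viewpoints_a.length : Int) path).contains t) result
        (PySem.List.slice viewpoints_a (some i) (some j))) result) u
  have hB : (sublistsOf viewpoints_a).foldl
      (condAdd (fun t => (subsSet (viewpoints_a.length : Int) path).contains t)) u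
      = (PySem.List.pyRange 0 (viewpoints_a.length : Int)).foldl (fun result i =>
        (PySem.List.pyRange (i + 1) ((viewpoints_a.length : Int) + 1)).foldl (fun result j =>
          condAdd (fun t => (subsSet (viewpoints_a.length : Int) path).contains t) result
            (PySem.List.slice viewpoints_a (some i) (some j))) result) u := by
    unfold sublistsOf
    rw [List.foldl_flatMap]
    exact PySem.List.foldl_congr_mem _ _ _ _ (fun acc i _ => List.foldl_map)
  rw [← hB]
  refine PySem.List.foldl_congr_mem _ _ _ _ (fun s x hx => ?_)
  unfold condAdd
  obtain ⟨h1, h2⟩ := length_mem_sublistsOf hx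
  have : (subsSet (viewpoints_a.length : Int) path).contains x = occA path x := by
    by_cases hocc : occA path x = true
    · rw [hocc, (PySem.Set.contains_iff _ x).mpr ((mem_subsSet_iff path x h1 h2).mpr hocc)]
    · rw [Bool.eq_false_iff.mpr hocc]
      exact Bool.eq_false_iff.mpr (fun hc =>
        hocc ((mem_subsSet_iff path x h1 h2).mp ((PySem.Set.contains_iff _ x).mp hc)))
  simp only [this]

-- ===== VERDICT (by name: the statement is the Claim_ definition above) =====
theorem find_union_of_viewpoints_spec : Claim_equal_find_union_of_viewpoints := by
  intro viewpoints_a paths _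
  unfold Spec_find_union_of_viewpoints
  exact find_union_of_viewpoints_eq_alt viewpoints_a paths
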